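-- pv_equiv track=rewrite | github.com/Moghees244/web_crawlers | Politifact/Politifact/utils.py | preprocess_image_urls
-- ===== SOURCE A (Python) =====
-- def preprocess_image_urls(image_urls):
--         processed_urls = []
--         for url in image_urls:
--             if not url:
--                 continue
--             if not url.startswith(('http://', 'https://')):
--                 url = 'https://' + url
--
--             processed_urls.append(url)
--         return filter_urls(processed_urls)
--
-- def filter_urls(urls):
--      return urls[:4]
-- ===== SOURCE B (Python) =====
-- def preprocess_image_urls(image_urls):
--     result = []
--     n = 0
--     for url in image_urls:
--         if not url:
--             continue
--         if not url.startswith(('http://', 'https://')):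
--             url = 'https://' + url
--         result.append(url)
--         n += 1
--         if n == 4:
--             break
--     return result
-- ===== Notes on version B (the rewrite author's own statement) =====
-- stated objective: faster
-- what changed: B filters and fixes URLs in a single loop that breaks as soon as four valid URLs are collected, instead of processing the whole list and then slicing to four.
import Mathlib
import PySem

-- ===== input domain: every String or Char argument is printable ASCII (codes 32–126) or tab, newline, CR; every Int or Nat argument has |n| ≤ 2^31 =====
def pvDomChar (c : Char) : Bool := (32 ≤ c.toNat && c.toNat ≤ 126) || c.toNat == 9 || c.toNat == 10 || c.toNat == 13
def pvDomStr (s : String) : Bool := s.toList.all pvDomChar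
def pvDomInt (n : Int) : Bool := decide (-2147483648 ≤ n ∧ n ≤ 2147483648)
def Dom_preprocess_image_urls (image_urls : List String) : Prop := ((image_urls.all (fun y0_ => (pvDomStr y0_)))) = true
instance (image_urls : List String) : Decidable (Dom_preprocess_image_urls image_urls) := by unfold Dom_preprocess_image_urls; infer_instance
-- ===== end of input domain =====

-- B collects the first four valid URLs with an early-stopping loop instead of processing the whole list and slicing; same return value.

-- ===== PORT A =====
-- 'https://' + url when it has neither prefix (shared by both ports; both Pythons compute it the same way)
def pvFixUrl (url : String) : String :=
  if PySem.Str.startswith url "http://" || PySem.Str.startswith url "https://" then url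
  else String.ofList ("https://".toList ++ url.toList)

-- filter_urls(urls) = urls[:4]
def filter_urls (urls : List String) : List String :=
  PySem.List.slice urls none (some (4 : Int))

def preprocess_image_urls (image_urls : List String) : List String :=
  filter_urls (image_urls.foldl (fun processed_urls url =>
    if url = "" then processed_urls else processed_urls ++ [pvFixUrl url]) [])

-- ===== PORT B =====
-- loop with early break at the 4th collected URL
def pvCollect4 : List String → List String → Nat → List String
  | [], result, _ => result
  | url :: rest, result, n =>
      if url = "" then pvCollect4 rest result n
      else
        let result' := result ++ [pvFixUrl url]
        if n + 1 = 4 then result' else pvCollect4 rest result' (n + 1)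

def preprocess_image_urls_alt (image_urls : List String) : List String :=
  pvCollect4 image_urls [] 0

-- ===== PRECONDITION & SPEC =====
def Spec_preprocess_image_urls (image_urls : List String) (out : List String) : Prop := out = preprocess_image_urls_alt image_urls
instance (image_urls : List String) (out : List String) : Decidable (Spec_preprocess_image_urls image_urls out) := by unfold Spec_preprocess_image_urls; infer_instance

-- ===== CLAIM (what is proved, stated in full; the proofs are below) =====
def Claim_equal_preprocess_image_urls : Prop := ∀ (image_urls : List String), Dom_preprocess_image_urls image_urls → Spec_preprocess_image_urls image_urls (preprocess_image_urls image_urls)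

-- ===== LEMMAS AND PROOFS =====

-- A's loop only appends: its result on accumulator `acc` is `acc ++` its result on `[]`.
theorem pvFoldA_append (l : List String) (acc : List String) :
    l.foldl (fun processed_urls url =>
      if url = "" then processed_urls else processed_urls ++ [pvFixUrl url]) acc
    = acc ++ l.foldl (fun processed_urls url =>
      if url = "" then processed_urls else processed_urls ++ [pvFixUrl url]) [] := by
  induction l generalizing acc with
  | nil => simp
  | cons url rest ih =>
      by_cases hu : url = ""
      · rw [List.foldl_cons, List.foldl_cons, if_pos hu, if_pos hu]
        exact ih acc
      · rw [List.foldl_cons, List.foldl_cons, if_neg hu, if_neg hu, ih (acc ++ [pvFixUrl url]),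
          ih ([] ++ [pvFixUrl url]), List.nil_append, List.append_assoc]

-- Main invariant: with fewer than 4 collected so far, B's early-stopping loop
-- equals the first-4 truncation of A's full pass.
theorem pvCollect4_eq (l : List String) :
    ∀ (acc : List String), acc.length ≤ 3 →
    (l.foldl (fun processed_urls url =>
      if url = "" then processed_urls else processed_urls ++ [pvFixUrl url]) acc).take 4
    = pvCollect4 l acc acc.length := by
  induction l with
  | nil =>
      intro acc h
      simp [pvCollect4, List.take_of_length_le (by omega : acc.length ≤ 4)]
  | cons url rest ih =>
      intro acc h
      by_cases hu : url = ""
      · simp only [List.foldl_cons, pvCollect4, if_pos hu]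
        exact ih acc h
      · rw [List.foldl_cons, if_neg hu]
        by_cases h4 : acc.length + 1 = 4
        · have hlen : (acc ++ [pvFixUrl url]).length = 4 := by simp; omega
          rw [pvFoldA_append, pvCollect4, if_neg hu, if_pos h4]
          rw [← hlen, List.take_left]
        · have h4' : (acc ++ [pvFixUrl url]).length = acc.length + 1 := by simp
          rw [pvCollect4, if_neg hu]
          simp only [if_neg h4]
          have := ih (acc ++ [pvFixUrl url]) (by simp; omega)
          rw [h4'] at this
          exact this

-- ===== VERDICT (by name: the statement is the Claim_ definition above) =====
theorem preprocess_image_urls_spec : Claim_equal_preprocess_image_urls := by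
  intro image_urls _
  unfold Spec_preprocess_image_urls preprocess_image_urls preprocess_image_urls_alt filter_urls
  rw [show (4 : Int) = ((4 : Nat) : Int) by norm_num, PySem.List.slice_to_natCast]
  simpa using pvCollect4_eq image_urls [] (by simp)
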